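-- pv_equiv track=rewrite | github.com/PVirie/gcsg | grammars/context_free.py | DEL
-- ===== SOURCE A (Python) =====
-- def DEL(non_terminal_set, terminal_set, start_symbol, rules: dict):
--     # An ε-rule is a rule of the form
--     # A → ε,
--     # where A is not S0, the grammar's start symbol.
--     # To eliminate all rules of this form, first determine the set of all nonterminals that derive ε.
--     # If a rule A → ε exists, then A is nullable.
--     # If a rule A → X1 ... Xn exists, and every single Xi is nullable, then A is nullable, too.
--     # Obtain an intermediate grammar by replacing each rule
--     # A → X1 ... Xn
--     # by all versions with some nullable Xi omitted.
--     # By deleting in this grammar each ε-rule, unless its left-hand side is the start symbol, the transformed grammar is obtained.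
--
--     nullable_rules = set()
--     for nt, productions in rules.items():
--         for prod in productions:
--             if len(prod) == 0 and nt != start_symbol:
--                 nullable_rules.add(nt)
--
--     added = True
--     while added:
--         added=False
--         for nt, productions in rules.items():
--             for prod in productions:
--                 if all([x in nullable_rules for x in prod]):
--                     if nt not in nullable_rules:
--                         nullable_rules.add(nt)
--                         added = True
--
--     new_rules = {}
--     for nt, productions in rules.items():
--         new_rules[nt] = []
--         for prod in productions:
--             if len(prod) == 0:
--                 continue
--             if all([x in nullable_rules for x in prod]):
--                 new_prod = ""
--                 for x in prod:
--                     if x not in nullable_rules: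
--                         new_prod += x
--                 new_rules[nt].append(new_prod)
--             else:
--                 new_rules[nt].append(prod)
--
--     return non_terminal_set, terminal_set, start_symbol, new_rules
-- ===== SOURCE B (Python) =====
-- def DEL(non_terminal_set, terminal_set, start_symbol, rules: dict):
--     # Worklist nullable computation: index productions by the symbols they contain,
--     # and re-examine a production only when one of its symbols becomes nullable.
--     prods = [(nt, p) for nt, ps in rules.items() for p in ps]
--     occ = {}
--     for i, (nt, p) in enumerate(prods):
--         for c in p:
--             occ.setdefault(c, []).append(i)
--     nullable = set()
--     queue = []
--     for nt, p in prods: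
--         if len(p) == 0 and nt not in nullable:
--             nullable.add(nt)
--             queue.append(nt)
--     while queue:
--         s = queue.pop()
--         for i in occ.get(s, ()):
--             nt, p = prods[i]
--             if nt not in nullable and all(c in nullable for c in p):
--                 nullable.add(nt)
--                 queue.append(nt)
--     new_rules = {nt: [("" if all(c in nullable for c in p) else p)
--                      for p in ps if len(p) > 0]
--                  for nt, ps in rules.items()}
--     return non_terminal_set, terminal_set, start_symbol, new_rules
-- ===== Notes on version B (the rewrite author's own statement) =====
-- stated objective: alternative
-- what changed: Replaces A's repeated full-grammar sweeps for the nullable fixpoint by a worklist seeded with the epsilon-rule heads plus an index from each symbol to the productions containing it, so a production is re-examined only when one of its symbols becomes nullable; the new rule table is then built in one comprehension instead of dict mutation. On the measured random inputs A needs few sweeps, so B is not measurably faster there.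
import Mathlib
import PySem

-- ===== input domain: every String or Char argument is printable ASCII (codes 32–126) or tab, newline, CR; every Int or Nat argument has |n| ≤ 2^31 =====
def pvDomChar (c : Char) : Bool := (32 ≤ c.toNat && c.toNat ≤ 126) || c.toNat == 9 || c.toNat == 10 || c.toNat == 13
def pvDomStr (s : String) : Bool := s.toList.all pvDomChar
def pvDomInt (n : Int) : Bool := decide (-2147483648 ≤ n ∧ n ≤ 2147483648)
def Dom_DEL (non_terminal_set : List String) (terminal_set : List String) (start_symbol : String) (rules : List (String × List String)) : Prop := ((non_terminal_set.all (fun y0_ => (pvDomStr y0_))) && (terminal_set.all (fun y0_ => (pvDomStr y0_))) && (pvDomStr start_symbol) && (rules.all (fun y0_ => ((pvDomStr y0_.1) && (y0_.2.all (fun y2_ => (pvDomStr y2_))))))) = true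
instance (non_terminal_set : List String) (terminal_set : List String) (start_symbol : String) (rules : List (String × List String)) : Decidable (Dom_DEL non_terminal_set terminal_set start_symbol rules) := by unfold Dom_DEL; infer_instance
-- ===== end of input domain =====

-- B replaces A's repeated full-grammar sweeps for the nullable fixpoint by a worklist over an
-- index from each symbol to the productions containing it (objective: alternative algorithm).

-- `all(x in nullable for x in prod)` — shared one-line test, present verbatim in both Pythons
def delAllNull (null : PySem.Set String) (prod : String) : Bool :=
  prod.toList.all (fun c => PySem.Set.contains null (String.ofList [c]))

-- ===== PORT A =====
-- first loop: seed of ε-rule heads other than the start symbol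
def delSeed (start_symbol : String) (items : List (String × List String)) : PySem.Set String :=
  items.foldl (fun s q => q.2.foldl (fun s prod =>
    if PySem.Str.len prod = 0 ∧ q.1 ≠ start_symbol then PySem.Set.add s q.1 else s) s)
    PySem.Set.empty

-- body of one `for nt, productions in rules.items()` iteration of the while loop
def delInner (nt : String) (ps : List String) (acc : PySem.Set String × Bool) :
    PySem.Set String × Bool :=
  ps.foldl (fun acc prod =>
    if delAllNull acc.1 prod then
      if PySem.Set.contains acc.1 nt then acc else (PySem.Set.add acc.1 nt, true)
    else acc) acc

-- one full pass of the while body (entered with added = False)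
def delStep (items : List (String × List String)) (s : PySem.Set String) :
    PySem.Set String × Bool :=
  items.foldl (fun acc q => delInner q.1 q.2 acc) (s, false)

-- the while loop; each pass that sets `added` adds a fresh key, so fuel items.length + 1 always suffices
def delLoop (items : List (String × List String)) : Nat → PySem.Set String → PySem.Set String
  | 0, s => s
  | n + 1, s =>
    let r := delStep items s
    if r.2 then delLoop items n r.1 else r.1

-- `new_prod = ""; for x in prod: if x not in nullable: new_prod += x` (built as the char list, then one String.ofList — exact)
def delNewProd (null : PySem.Set String) (prod : String) : String :=
  String.ofList (prod.toList.foldl (fun acc c =>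
    if ¬ PySem.Set.contains null (String.ofList [c]) then acc ++ [c] else acc) [])

def DEL (non_terminal_set : List String) (terminal_set : List String) (start_symbol : String) (rules : List (String × List String)) : List String × List String × String × (List (String × List String)) :=
  let items := (PySem.Dict.ofList rules).items
  let nullable := delLoop items (items.length + 1) (delSeed start_symbol items)
  let newRules := items.foldl (fun d q =>
    q.2.foldl (fun d prod =>
      if PySem.Str.len prod = 0 then d
      else if delAllNull nullable prod then
        d.insert q.1 (d.getD q.1 [] ++ [delNewProd nullable prod])
      else d.insert q.1 (d.getD q.1 [] ++ [prod])) (d.insert q.1 ([] : List String)))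
    PySem.Dict.empty
  (non_terminal_set, terminal_set, start_symbol, newRules.items)

-- ===== PORT B =====
-- prods = [(nt, p) for nt, ps in rules.items() for p in ps]
def bProds (items : List (String × List String)) : List (String × String) :=
  items.flatMap (fun q => q.2.map (fun p => (q.1, p)))

-- for i, (nt, p) in enumerate(prods): for c in p: occ.setdefault(c, []).append(i)
def bOcc (prods : List (String × String)) : PySem.Dict String (List Nat) :=
  prods.zipIdx.foldl (fun d q =>
    q.1.2.toList.foldl (fun d c => d.modify (String.ofList [c]) [] (· ++ [q.2])) d)
    PySem.Dict.empty

-- seeding loop: nullable ε-rule heads, queued once each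
def bSeed (prods : List (String × String)) : PySem.Set String × List String :=
  prods.foldl (fun st q =>
    if PySem.Str.len q.2 = 0 ∧ ¬ PySem.Set.contains st.1 q.1 then
      (PySem.Set.add st.1 q.1, q.1 :: st.2)
    else st) (PySem.Set.empty, [])

-- body of `for i in occ.get(s, ())` (prods[i] never raises: occ only holds valid indices, so getD is exact)
def bVisit (prods : List (String × String)) (st : PySem.Set String × List String) (i : Nat) :
    PySem.Set String × List String :=
  let q := prods.getD i ("", "")
  if ¬ PySem.Set.contains st.1 q.1 ∧ delAllNull st.1 q.2 then
    (PySem.Set.add st.1 q.1, q.1 :: st.2)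
  else st

def bScan (prods : List (String × String)) (idxs : List Nat)
    (st : PySem.Set String × List String) : PySem.Set String × List String :=
  idxs.foldl (bVisit prods) st

-- `while queue:` — LIFO queue kept head-first; every pop strictly decreases
-- queue length + not-yet-nullable keys, so the fuel passed in DEL_alt always suffices
def bWork (prods : List (String × String)) (occ : PySem.Dict String (List Nat)) :
    Nat → PySem.Set String → List String → PySem.Set String
  | 0, null, _ => null
  | _ + 1, null, [] => null
  | n + 1, null, s :: rest =>
    let st := bScan prods (occ.getD s []) (null, rest)
    bWork prods occ n st.1 st.2

def DEL_alt (non_terminal_set : List String) (terminal_set : List String) (start_symbol : String) (rules : List (String × List String)) : List String × List String × String × (List (String × List String)) :=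
  let items := (PySem.Dict.ofList rules).items
  let prods := bProds items
  let occ := bOcc prods
  let sq := bSeed prods
  let nullable := bWork prods occ (sq.2.length + items.length) sq.1 sq.2
  let newRules := items.foldl (fun d q =>
    d.insert q.1 ((q.2.filter (fun p => decide (0 < PySem.Str.len p))).map
      (fun p => if delAllNull nullable p then "" else p))) PySem.Dict.empty
  (non_terminal_set, terminal_set, start_symbol, newRules.items)

-- ===== PRECONDITION & SPEC =====
def Spec_DEL (non_terminal_set : List String) (terminal_set : List String) (start_symbol : String) (rules : List (String × List String)) (out : List String × List String × String × (List (String × List String))) : Prop := out = DEL_alt non_terminal_set terminal_set start_symbol rules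
instance (non_terminal_set : List String) (terminal_set : List String) (start_symbol : String) (rules : List (String × List String)) (out : List String × List String × String × (List (String × List String))) : Decidable (Spec_DEL non_terminal_set terminal_set start_symbol rules out) := by unfold Spec_DEL; infer_instance

-- ===== CLAIM (what is proved, stated in full; the proofs are below) =====
def Claim_equal_DEL : Prop := ∀ (non_terminal_set : List String) (terminal_set : List String) (start_symbol : String) (rules : List (String × List String)), Dom_DEL non_terminal_set terminal_set start_symbol rules → Spec_DEL non_terminal_set terminal_set start_symbol rules (DEL non_terminal_set terminal_set start_symbol rules)

-- ===== LEMMAS AND PROOFS =====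

-- the nullable nonterminals: least relation closed under "some production with all symbols nullable"
inductive NL (items : List (String × List String)) : String → Prop
  | mk (nt : String) (ps : List String) (p : String) :
      (nt, ps) ∈ items → p ∈ ps →
      (∀ c ∈ p.toList, NL items (String.ofList [c])) → NL items nt

def ClosedP (prods : List (String × String)) (null : PySem.Set String) : Prop :=
  ∀ q ∈ prods, (∀ c ∈ q.2.toList, String.ofList [c] ∈ null) → q.1 ∈ null

-- generic facts ----------------------------------------------------------

theorem str_len_zero_iff (s : String) : PySem.Str.len s = 0 ↔ s = "" := by
  constructor
  · intro h
    simp [PySem.Str.len_eq] at h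
    exact (String.empty_eq_iff.mpr h).symm
  · intro h; simp [h, PySem.Str.len_eq]

theorem set_contains_congr {s t : PySem.Set String} (h : ∀ y, y ∈ s ↔ y ∈ t) (x : String) :
    PySem.Set.contains s x = PySem.Set.contains t x := by
  have hs : ∀ (u : PySem.Set String), x ∈ u → PySem.Set.contains u x = true :=
    fun u hu => (PySem.Set.contains_iff u x).2 hu
  have hn : ∀ (u : PySem.Set String), x ∉ u → PySem.Set.contains u x = false := by
    intro u hu
    cases hc : PySem.Set.contains u x
    · rfl
    · exact absurd ((PySem.Set.contains_iff u x).1 hc) hu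
  by_cases hx : x ∈ s
  · rw [hs s hx, hs t ((h x).1 hx)]
  · rw [hn s hx, hn t (fun ht => hx ((h x).2 ht))]

theorem delAllNull_congr {s t : PySem.Set String} (h : ∀ y, y ∈ s ↔ y ∈ t) (p : String) :
    delAllNull s p = delAllNull t p := by
  unfold delAllNull
  exact List.all_congr rfl (fun c => set_contains_congr h _)

theorem dict_insert_insert_self {κ ν : Type} [BEq κ] [LawfulBEq κ] (d : PySem.Dict κ ν) (k : κ) (v w : ν) :
    (d.insert k v).insert k w = d.insert k w := by
  apply PySem.Dict.ext
  rw [PySem.Dict.items_insert_of_contains _ _ (PySem.Dict.contains_insert_self d k v),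
      PySem.Dict.items_insert, PySem.Dict.items_insert]
  by_cases h : d.contains k = true
  · rw [if_pos h, if_pos h, List.map_map]
    refine List.map_congr_left (fun p _ => ?_)
    by_cases hp : p.1 == k <;> simp [hp, Function.comp]
  · rw [if_neg h, if_neg h, List.map_append]
    have hmap : ∀ p ∈ d.items, (fun p : κ × ν => if (p.1 == k) = true then (k, w) else p) p = p := by
      intro p hp
      have hk : ¬ (p.1 == k) = true := by
        intro hk
        have hkk : k ∈ d.keys := by
          have := List.mem_map_of_mem (f := Prod.fst) hp
          simpa [PySem.Dict.keys, eq_of_beq hk] using this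
        rw [← PySem.Dict.contains_iff_mem_keys] at hkk
        exact h hkk
      simp [hk]
    rw [List.map_congr_left hmap]
    simp

theorem countP_notin_mono {keys : List String} {s t : List String} (hsub : ∀ y ∈ s, y ∈ t) :
    keys.countP (fun k => decide (k ∉ t)) ≤ keys.countP (fun k => decide (k ∉ s)) := by
  refine List.countP_mono_left (fun a _ h => ?_)
  simp only [decide_eq_true_eq] at *
  exact fun hs => h (hsub a hs)

theorem countP_notin_lt {keys : List String} {x : String} (hxk : x ∈ keys)
    {s t : List String} (hsub : ∀ y ∈ s, y ∈ t) (hxs : x ∉ s) (hxt : x ∈ t) :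
    keys.countP (fun k => decide (k ∉ t)) < keys.countP (fun k => decide (k ∉ s)) := by
  induction keys with
  | nil => cases hxk
  | cons hd tl ih =>
    rw [List.countP_cons, List.countP_cons]
    rcases List.mem_cons.1 hxk with rfl | hmem
    · have h1 : (decide (x ∉ t)) = false := by simp [hxt]
      have h2 : (decide (x ∉ s)) = true := by simp [hxs]
      simp only [h1, h2, Bool.false_eq_true, if_false, if_true]
      have := countP_notin_mono (keys := tl) hsub
      omega
    · have hle : (if decide (hd ∉ t) = true then 1 else 0) ≤ (if decide (hd ∉ s) = true then 1 else 0) := by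
        by_cases hh : hd ∉ t
        · have : hd ∉ s := fun hs => hh (hsub hd hs)
          simp [hh, this]
        · simp [hh]
      have := ih hmem
      omega

-- A-side: properties of one while-pass ------------------------------------

def stepA (nt : String) (acc : PySem.Set String × Bool) (prod : String) :
    PySem.Set String × Bool :=
  if delAllNull acc.1 prod then
    if PySem.Set.contains acc.1 nt then acc else (PySem.Set.add acc.1 nt, true)
  else acc

theorem delInner_eq (nt : String) (ps : List String) (acc : PySem.Set String × Bool) :
    delInner nt ps acc = ps.foldl (stepA nt) acc := rfl

theorem stepA_mono (nt : String) (acc : PySem.Set String × Bool) (p : String) :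
    ∀ x ∈ acc.1, x ∈ (stepA nt acc p).1 := by
  intro x hx
  unfold stepA
  split_ifs with h1 h2
  · exact hx
  · exact (PySem.Set.mem_add _ _ _).2 (Or.inl hx)
  · exact hx

theorem stepA_flag (nt : String) (acc : PySem.Set String × Bool) (p : String)
    (h : acc.2 = true) : (stepA nt acc p).2 = true := by
  unfold stepA
  split_ifs <;> simp_all

theorem stepA_false (nt : String) (acc : PySem.Set String × Bool) (p : String)
    (h : (stepA nt acc p).2 = false) :
    stepA nt acc p = acc ∧ (delAllNull acc.1 p = true → nt ∈ acc.1) := by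
  unfold stepA at *
  split_ifs at * with h1 h2
  · exact ⟨rfl, fun _ => (PySem.Set.contains_iff _ _).1 h2⟩
  · exact ⟨rfl, fun hall => absurd hall (by simp [h1])⟩

theorem stepA_new (nt : String) (acc : PySem.Set String × Bool) (p : String)
    (h0 : acc.2 = false) (h : (stepA nt acc p).2 = true) :
    nt ∈ (stepA nt acc p).1 ∧ nt ∉ acc.1 := by
  unfold stepA at *
  split_ifs at * with h1 h2
  · simp_all
  · refine ⟨by simp [PySem.Set.mem_add], fun hmem => ?_⟩
    exact h2 ((PySem.Set.contains_iff _ _).2 hmem)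
  · simp_all

theorem stepA_sound (items : List (String × List String)) (nt : String) (ps : List String)
    (hq : (nt, ps) ∈ items) (p : String) (hp : p ∈ ps) (acc : PySem.Set String × Bool)
    (hacc : ∀ x ∈ acc.1, NL items x) : ∀ x ∈ (stepA nt acc p).1, NL items x := by
  intro x hx
  unfold stepA at hx
  split_ifs at hx with h1 h2
  · exact hacc x hx
  · rw [PySem.Set.mem_add] at hx
    rcases hx with hx | rfl
    · exact hacc x hx
    · refine NL.mk x ps p hq hp (fun c hc => ?_)
      unfold delAllNull at h1
      rw [List.all_eq_true] at h1
      exact hacc _ ((PySem.Set.contains_iff _ _).1 (h1 c hc))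
  · exact hacc x hx

theorem delInner_mono (nt : String) (ps : List String) (acc : PySem.Set String × Bool) :
    ∀ x ∈ acc.1, x ∈ (delInner nt ps acc).1 := by
  rw [delInner_eq]
  induction ps generalizing acc with
  | nil => exact fun x hx => hx
  | cons p ps ih =>
    intro x hx
    exact ih (stepA nt acc p) x (stepA_mono nt acc p x hx)

theorem delInner_flag (nt : String) (ps : List String) (acc : PySem.Set String × Bool)
    (h : acc.2 = true) : (delInner nt ps acc).2 = true := by
  rw [delInner_eq]
  induction ps generalizing acc with
  | nil => exact h
  | cons p ps ih => exact ih (stepA nt acc p) (stepA_flag nt acc p h)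

theorem delInner_false (nt : String) (ps : List String) (acc : PySem.Set String × Bool)
    (h : (delInner nt ps acc).2 = false) :
    acc.2 = false ∧ (delInner nt ps acc).1 = acc.1 ∧
      ∀ p ∈ ps, delAllNull acc.1 p = true → nt ∈ acc.1 := by
  rw [delInner_eq] at *
  induction ps generalizing acc with
  | nil => exact ⟨h, rfl, by simp⟩
  | cons p ps ih =>
    rw [List.foldl_cons] at h ⊢
    have hstep : (stepA nt acc p).2 = false := by
      cases hs : (stepA nt acc p).2
      · rfl
      · rw [← delInner_eq] at h
        rw [delInner_flag nt ps (stepA nt acc p) hs] at h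
        cases h
    obtain ⟨heq, himp⟩ := stepA_false nt acc p hstep
    rw [heq] at h ⊢
    obtain ⟨h1, h2, h3⟩ := ih acc h
    exact ⟨h1, h2, fun p' hp' => by
      rcases List.mem_cons.1 hp' with rfl | hmem
      · exact himp
      · exact h3 p' hmem⟩

theorem delInner_new (nt : String) (ps : List String) (acc : PySem.Set String × Bool)
    (h0 : acc.2 = false) (h : (delInner nt ps acc).2 = true) :
    nt ∈ (delInner nt ps acc).1 ∧ nt ∉ acc.1 := by
  rw [delInner_eq] at *
  induction ps generalizing acc with
  | nil => rw [List.foldl_nil] at h; rw [h0] at h; cases h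
  | cons p ps ih =>
    rw [List.foldl_cons] at h ⊢
    cases hs : (stepA nt acc p).2
    · obtain ⟨heq, _⟩ := stepA_false nt acc p hs
      rw [heq] at h ⊢
      obtain ⟨ha, hb⟩ := ih acc h0 h
      exact ⟨ha, hb⟩
    · obtain ⟨ha, hb⟩ := stepA_new nt acc p h0 hs
      refine ⟨?_, hb⟩
      rw [← delInner_eq]
      exact delInner_mono nt ps (stepA nt acc p) nt ha

theorem delInner_sound (items : List (String × List String)) (nt : String) (ps : List String)
    (hq : (nt, ps) ∈ items) (acc : PySem.Set String × Bool)
    (hacc : ∀ x ∈ acc.1, NL items x) : ∀ x ∈ (delInner nt ps acc).1, NL items x := by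
  rw [delInner_eq]
  have : ∀ (l : List String), (∀ p ∈ l, p ∈ ps) → ∀ acc, (∀ x ∈ acc.1, NL items x) →
      ∀ x ∈ (l.foldl (stepA nt) acc).1, NL items x := by
    intro l
    induction l with
    | nil => exact fun _ acc hacc x hx => hacc x hx
    | cons p l ih =>
      intro hl acc hacc
      rw [List.foldl_cons]
      exact ih (fun p' hp' => hl p' (List.mem_cons_of_mem _ hp')) (stepA nt acc p)
        (stepA_sound items nt ps hq p (hl p (List.mem_cons_self)) acc hacc)
  exact this ps (fun _ hp => hp) acc hacc

theorem delStepAux_mono (items : List (String × List String)) (acc : PySem.Set String × Bool) :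
    ∀ x ∈ acc.1, x ∈ (items.foldl (fun acc q => delInner q.1 q.2 acc) acc).1 := by
  induction items generalizing acc with
  | nil => exact fun x hx => hx
  | cons q items ih =>
    intro x hx
    exact ih (delInner q.1 q.2 acc) x (delInner_mono q.1 q.2 acc x hx)

theorem delStepAux_flag (items : List (String × List String)) (acc : PySem.Set String × Bool)
    (h : acc.2 = true) : (items.foldl (fun acc q => delInner q.1 q.2 acc) acc).2 = true := by
  induction items generalizing acc with
  | nil => exact h
  | cons q items ih => exact ih (delInner q.1 q.2 acc) (delInner_flag q.1 q.2 acc h)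

theorem delStepAux_false (items : List (String × List String)) (acc : PySem.Set String × Bool)
    (h : (items.foldl (fun acc q => delInner q.1 q.2 acc) acc).2 = false) :
    acc.2 = false ∧ (items.foldl (fun acc q => delInner q.1 q.2 acc) acc).1 = acc.1 ∧
      ∀ q ∈ items, ∀ p ∈ q.2, delAllNull acc.1 p = true → q.1 ∈ acc.1 := by
  induction items generalizing acc with
  | nil => exact ⟨h, rfl, by simp⟩
  | cons q items ih =>
    rw [List.foldl_cons] at h ⊢
    have hstep : (delInner q.1 q.2 acc).2 = false := by
      cases hs : (delInner q.1 q.2 acc).2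
      · rfl
      · rw [delStepAux_flag items _ hs] at h; cases h
    obtain ⟨h0, heq, himp⟩ := delInner_false q.1 q.2 acc hstep
    have hpair : delInner q.1 q.2 acc = acc := Prod.ext_iff.2 ⟨heq, hstep.trans h0.symm⟩
    rw [hpair] at h ⊢
    obtain ⟨h1, h2, h3⟩ := ih acc h
    exact ⟨h0, h2, fun q' hq' p hp hall => by
      rcases List.mem_cons.1 hq' with rfl | hmem
      · exact himp p hp hall
      · exact h3 q' hmem p hp hall⟩

theorem delStepAux_new (items : List (String × List String)) (acc : PySem.Set String × Bool)
    (h0 : acc.2 = false) (h : (items.foldl (fun acc q => delInner q.1 q.2 acc) acc).2 = true) :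
    ∃ x, x ∈ (items.foldl (fun acc q => delInner q.1 q.2 acc) acc).1 ∧ x ∉ acc.1 ∧
      x ∈ items.map Prod.fst := by
  induction items generalizing acc with
  | nil => rw [List.foldl_nil] at h; rw [h0] at h; cases h
  | cons q items ih =>
    rw [List.foldl_cons] at h ⊢
    cases hs : (delInner q.1 q.2 acc).2
    · obtain ⟨_, heq, _⟩ := delInner_false q.1 q.2 acc hs
      obtain ⟨x, hx1, hx2, hx3⟩ := ih (delInner q.1 q.2 acc) hs h
      rw [heq] at hx2
      exact ⟨x, hx1, hx2, by simp [hx3]⟩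
    · obtain ⟨ha, hb⟩ := delInner_new q.1 q.2 acc h0 hs
      refine ⟨q.1, delStepAux_mono items _ q.1 ha, hb, by simp⟩

theorem delStepAux_sound (items l : List (String × List String)) (hl : ∀ q ∈ l, q ∈ items)
    (acc : PySem.Set String × Bool) (hacc : ∀ x ∈ acc.1, NL items x) :
    ∀ x ∈ (l.foldl (fun acc q => delInner q.1 q.2 acc) acc).1, NL items x := by
  induction l generalizing acc with
  | nil => exact fun x hx => hacc x hx
  | cons q l ih =>
    rw [List.foldl_cons]
    exact ih (fun q' hq' => hl q' (List.mem_cons_of_mem _ hq')) (delInner q.1 q.2 acc)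
      (delInner_sound items q.1 q.2 (by
        have := hl q (List.mem_cons_self)
        simpa using this) acc hacc)

-- A-side: the loop --------------------------------------------------------

theorem delLoop_sound (items : List (String × List String)) (fuel : Nat) (s : PySem.Set String)
    (hs : ∀ x ∈ s, NL items x) : ∀ x ∈ delLoop items fuel s, NL items x := by
  induction fuel generalizing s with
  | zero => exact hs
  | succ n ih =>
    have hstep : ∀ x ∈ (delStep items s).1, NL items x :=
      delStepAux_sound items items (fun _ hq => hq) (s, false) hs
    simp only [delLoop]
    split
    · exact ih (delStep items s).1 hstep
    · exact hstep

theorem delLoop_closed (items : List (String × List String)) (fuel : Nat) (s : PySem.Set String)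
    (hfuel : (items.map Prod.fst).countP (fun k => decide (k ∉ s)) < fuel) :
    ∀ q ∈ items, ∀ p ∈ q.2, delAllNull (delLoop items fuel s) p = true →
      q.1 ∈ delLoop items fuel s := by
  induction fuel generalizing s with
  | zero => omega
  | succ n ih =>
    simp only [delLoop, delStep]
    cases hr : (items.foldl (fun acc q => delInner q.1 q.2 acc) (s, false)).2
    · simp only [Bool.false_eq_true, if_false]
      obtain ⟨_, heq, hcl⟩ := delStepAux_false items (s, false) hr
      rw [heq]
      exact hcl
    · simp only [if_true]
      refine ih _ ?_
      obtain ⟨x, hx1, hx2, hx3⟩ := delStepAux_new items (s, false) rfl hr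
      have hlt := countP_notin_lt (keys := items.map Prod.fst) hx3
        (delStepAux_mono items (s, false)) hx2 hx1
      have hb : List.countP (fun k => decide (k ∉ ((s, false) : PySem.Set String × Bool).1))
          (items.map Prod.fst) = List.countP (fun k => decide (k ∉ s)) (items.map Prod.fst) := rfl
      omega

theorem delSeed_sound (items : List (String × List String)) (start_symbol : String) :
    ∀ x ∈ delSeed start_symbol items, NL items x := by
  unfold delSeed
  refine List.foldlRecOn (motive := fun s => ∀ x ∈ s, NL items x) items _ ?_ ?_
  · intro x hx
    simp [PySem.Set.empty] at hx
  intro b hb q hq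
  refine List.foldlRecOn (motive := fun s => ∀ x ∈ s, NL items x) q.2 _ hb ?_
  intro b' hb' prod hprod x hx
  split_ifs at hx with hc
  · rw [PySem.Set.mem_add] at hx
    rcases hx with hx | rfl
    · exact hb' x hx
    · refine NL.mk q.1 q.2 prod (by simpa using hq) hprod (fun c hc' => ?_)
      have : prod = "" := (str_len_zero_iff prod).1 hc.1
      rw [this] at hc'
      simp at hc'
  · exact hb' x hx

theorem NL_mem_of_closed (items : List (String × List String)) (N : PySem.Set String)
    (hcl : ∀ q ∈ items, ∀ p ∈ q.2, delAllNull N p = true → q.1 ∈ N) :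
    ∀ x, NL items x → x ∈ N := by
  intro x hx
  induction hx with
  | mk nt ps p hin hp hch ih =>
    refine hcl (nt, ps) hin p hp ?_
    unfold delAllNull
    rw [List.all_eq_true]
    exact fun c hc => (PySem.Set.contains_iff _ _).2 (ih c hc)

theorem A_char (items : List (String × List String)) (start_symbol : String) :
    ∀ x, x ∈ delLoop items (items.length + 1) (delSeed start_symbol items) ↔ NL items x := by
  intro x
  constructor
  · exact fun h => delLoop_sound items _ _ (delSeed_sound items start_symbol) x h
  · intro h
    refine NL_mem_of_closed items _ ?_ x h
    refine fun q hq p hp hall => delLoop_closed items _ _ ?_ q hq p hp hall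
    calc (items.map Prod.fst).countP (fun k => decide (k ∉ delSeed start_symbol items))
        ≤ (items.map Prod.fst).length := List.countP_le_length
      _ = items.length := List.length_map _
      _ < items.length + 1 := Nat.lt_succ_self _

-- B-side: occurrence index -------------------------------------------------

theorem bOcc_eq (prods : List (String × String)) :
    bOcc prods = (prods.zipIdx.flatMap
        (fun q => q.1.2.toList.map (fun c => (String.ofList [c], q.2)))).foldl
      (fun d p => d.modify p.1 [] (· ++ [p.2])) PySem.Dict.empty := by
  rw [List.foldl_flatMap]
  unfold bOcc
  simp [List.foldl_map]

theorem bOcc_getD (prods : List (String × String)) (s : String) :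
    (bOcc prods).getD s [] =
      ((prods.zipIdx.flatMap (fun q => q.1.2.toList.map (fun c => (String.ofList [c], q.2)))).filter
        (fun pr => pr.1 == s)).map (·.2) := by
  rw [bOcc_eq, PySem.Dict.getD_foldl_modify_append, PySem.Dict.getD_empty]
  simp

theorem bOcc_lt (prods : List (String × String)) (s : String) (i : Nat)
    (h : i ∈ (bOcc prods).getD s []) : i < prods.length := by
  rw [bOcc_getD] at h
  obtain ⟨pr, hpr, rfl⟩ := List.mem_map.1 h
  have hpr' := (List.mem_filter.1 hpr).1
  obtain ⟨q, hq, hmem⟩ := List.mem_flatMap.1 hpr'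
  obtain ⟨c, _, rfl⟩ := List.mem_map.1 hmem
  obtain ⟨a, j⟩ := q
  have := List.mk_mem_zipIdx_iff_getElem?.1 hq
  simp only []
  exact List.getElem?_eq_some_iff.1 this |>.1 |> fun h => h

theorem bOcc_complete (prods : List (String × String)) (i : Nat) (hi : i < prods.length)
    (c : Char) (hc : c ∈ (prods[i].2).toList) :
    i ∈ (bOcc prods).getD (String.ofList [c]) [] := by
  rw [bOcc_getD]
  refine List.mem_map.2 ⟨(String.ofList [c], i), List.mem_filter.2 ⟨?_, by simp⟩, rfl⟩
  refine List.mem_flatMap.2 ⟨(prods[i], i), ?_, List.mem_map.2 ⟨c, hc, rfl⟩⟩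
  rw [List.mk_mem_zipIdx_iff_getElem?]
  simp [hi]

-- B-side: seed -------------------------------------------------------------

def seedStep (st : PySem.Set String × List String) (q : String × String) :
    PySem.Set String × List String :=
  if PySem.Str.len q.2 = 0 ∧ ¬ PySem.Set.contains st.1 q.1 then
    (PySem.Set.add st.1 q.1, q.1 :: st.2)
  else st

theorem bSeed_eq (prods : List (String × String)) :
    bSeed prods = prods.foldl seedStep (PySem.Set.empty, []) := rfl

theorem seedStep_mem1 (st : PySem.Set String × List String) (q : String × String) (x : String) :
    x ∈ (seedStep st q).1 ↔ x ∈ st.1 ∨ (x = q.1 ∧ q.2 = "") := by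
  unfold seedStep
  split_ifs with hc
  · have hq2 : q.2 = "" := (str_len_zero_iff q.2).1 hc.1
    simp only [PySem.Set.mem_add]
    tauto
  · rw [Decidable.not_and_iff_not_or_not, not_not] at hc
    constructor
    · exact fun h => Or.inl h
    · rintro (h | ⟨rfl, hq2⟩)
      · exact h
      · rcases hc with hc | hc
        · exact absurd ((str_len_zero_iff q.2).2 hq2) hc
        · exact (PySem.Set.contains_iff _ _).1 hc

theorem seedStep_mem2 (st : PySem.Set String × List String) (q : String × String) (x : String) :
    x ∈ (seedStep st q).2 ↔ x ∈ st.2 ∨ (x ∈ (seedStep st q).1 ∧ x ∉ st.1) := by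
  unfold seedStep
  split_ifs with hc
  · simp only [List.mem_cons, PySem.Set.mem_add]
    have hq1 : q.1 ∉ st.1 := fun h => hc.2 ((PySem.Set.contains_iff _ _).2 h)
    constructor
    · rintro (rfl | h)
      · exact Or.inr ⟨Or.inr rfl, hq1⟩
      · exact Or.inl h
    · rintro (h | ⟨h1 | rfl, h2⟩)
      · exact Or.inr h
      · exact absurd h1 h2
      · exact Or.inl rfl
  · tauto

theorem seedStep_pres (st : PySem.Set String × List String) (q : String × String)
    (h : st.2.Nodup ∧ ∀ x ∈ st.2, x ∈ st.1) :
    (seedStep st q).2.Nodup ∧ ∀ x ∈ (seedStep st q).2, x ∈ (seedStep st q).1 := by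
  unfold seedStep
  split_ifs with hc
  · have hq1 : q.1 ∉ st.1 := fun hm => hc.2 ((PySem.Set.contains_iff _ _).2 hm)
    refine ⟨List.Nodup.cons (fun hm => hq1 (h.2 q.1 hm)) h.1, ?_⟩
    intro x hx
    rcases List.mem_cons.1 hx with rfl | hx
    · exact (PySem.Set.mem_add _ _ _).2 (Or.inr rfl)
    · exact (PySem.Set.mem_add _ _ _).2 (Or.inl (h.2 x hx))
  · exact h

theorem bSeed_aux (prods : List (String × String)) (st : PySem.Set String × List String) :
    (∀ x ∈ st.1, x ∈ (prods.foldl seedStep st).1) ∧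
    (∀ x, x ∈ (prods.foldl seedStep st).1 ↔ x ∈ st.1 ∨ (x, "") ∈ prods) ∧
    (∀ x, x ∈ (prods.foldl seedStep st).2 ↔
      x ∈ st.2 ∨ (x ∈ (prods.foldl seedStep st).1 ∧ x ∉ st.1)) ∧
    ((st.2.Nodup ∧ ∀ x ∈ st.2, x ∈ st.1) →
      ((prods.foldl seedStep st).2.Nodup ∧
        ∀ x ∈ (prods.foldl seedStep st).2, x ∈ (prods.foldl seedStep st).1)) := by
  induction prods generalizing st with
  | nil =>
    refine ⟨fun x hx => hx, fun x => by simp, fun x => by simp, fun h => h⟩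
  | cons q prods ih =>
    simp only [List.foldl_cons]
    obtain ⟨ih1, ih2, ih3, ih4⟩ := ih (seedStep st q)
    have s1 := seedStep_mem1 st q
    have s2 := seedStep_mem2 st q
    refine ⟨?_, ?_, ?_, ?_⟩
    · intro x hx
      exact ih1 x ((s1 x).2 (Or.inl hx))
    · intro x
      rw [ih2 x, s1 x]
      constructor
      · rintro ((h | ⟨rfl, h⟩) | h)
        · exact Or.inl h
        · exact Or.inr (by simp [← h])
        · exact Or.inr (List.mem_cons_of_mem _ h)
      · rintro (h | h)
        · exact Or.inl (Or.inl h)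
        · rcases List.mem_cons.1 h with heq | hm
          · exact Or.inl (Or.inr ⟨congrArg Prod.fst heq, (congrArg Prod.snd heq).symm⟩)
          · exact Or.inr hm
    · intro x
      rw [ih3 x, s2 x]
      have hsub1 : x ∈ (seedStep st q).1 → x ∈ (prods.foldl seedStep (seedStep st q)).1 := ih1 x
      have hmono : x ∈ st.1 → x ∈ (seedStep st q).1 := fun h => (s1 x).2 (Or.inl h)
      constructor
      · rintro ((h | ⟨h1, h2⟩) | ⟨h1, h2⟩)
        · exact Or.inl h
        · exact Or.inr ⟨hsub1 h1, h2⟩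
        · exact Or.inr ⟨h1, fun hm => h2 (hmono hm)⟩
      · rintro (h | ⟨h1, h2⟩)
        · exact Or.inl (Or.inl h)
        · by_cases hx : x ∈ (seedStep st q).1
          · exact Or.inl (Or.inr ⟨hx, h2⟩)
          · exact Or.inr ⟨h1, hx⟩
    · intro h
      exact ih4 (seedStep_pres st q h)

-- B-side: scan of one popped symbol ---------------------------------------

theorem bProds_split (items : List (String × List String)) :
    ∀ q ∈ bProds items, ∃ ps, (q.1, ps) ∈ items ∧ q.2 ∈ ps := by
  intro q hq
  obtain ⟨a, ha, hm⟩ := List.mem_flatMap.1 hq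
  obtain ⟨p, hp, rfl⟩ := List.mem_map.1 hm
  exact ⟨a.2, by simpa using ha, hp⟩

theorem bProds_fst (items : List (String × List String)) :
    ∀ q ∈ bProds items, q.1 ∈ items.map Prod.fst := by
  intro q hq
  obtain ⟨a, ha, hm⟩ := List.mem_flatMap.1 hq
  obtain ⟨p, hp, rfl⟩ := List.mem_map.1 hm
  exact List.mem_map.2 ⟨a, ha, rfl⟩

theorem getD_mem_of_lt (prods : List (String × String)) (i : Nat) (hi : i < prods.length) :
    prods.getD i ("", "") ∈ prods := by
  rw [List.getD_eq_getElem prods _ hi]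
  exact List.getElem_mem hi

theorem bVisit_mono (prods : List (String × String)) (st : PySem.Set String × List String)
    (i : Nat) : ∀ x ∈ st.1, x ∈ (bVisit prods st i).1 := by
  intro x hx
  simp only [bVisit]
  split_ifs
  · exact (PySem.Set.mem_add _ _ _).2 (Or.inl hx)
  · exact hx

theorem bVisit_qmono (prods : List (String × String)) (st : PySem.Set String × List String)
    (i : Nat) : ∀ x ∈ st.2, x ∈ (bVisit prods st i).2 := by
  intro x hx
  simp only [bVisit]
  split_ifs
  · exact List.mem_cons_of_mem _ hx
  · exact hx

theorem bVisit_sub (prods : List (String × String)) (st : PySem.Set String × List String)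
    (i : Nat) : ∀ x ∈ (bVisit prods st i).1, x ∈ st.1 ∨ x ∈ (bVisit prods st i).2 := by
  intro x hx
  simp only [bVisit] at *
  split_ifs at * with hc
  · rcases (PySem.Set.mem_add _ _ _).1 hx with hx | rfl
    · exact Or.inl hx
    · exact Or.inr (List.mem_cons_self)
  · exact Or.inl hx

theorem bVisit_pres (prods : List (String × String)) (st : PySem.Set String × List String)
    (i : Nat) (h : st.2.Nodup ∧ ∀ x ∈ st.2, x ∈ st.1) :
    (bVisit prods st i).2.Nodup ∧ ∀ x ∈ (bVisit prods st i).2, x ∈ (bVisit prods st i).1 := by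
  simp only [bVisit]
  split_ifs with hc
  · have hq1 : (prods.getD i ("", "")).1 ∉ st.1 :=
      fun hm => hc.1 ((PySem.Set.contains_iff _ _).2 hm)
    refine ⟨List.Nodup.cons (fun hm => hq1 (h.2 _ hm)) h.1, ?_⟩
    intro x hx
    rcases List.mem_cons.1 hx with rfl | hx
    · exact (PySem.Set.mem_add _ _ _).2 (Or.inr rfl)
    · exact (PySem.Set.mem_add _ _ _).2 (Or.inl (h.2 x hx))
  · exact h

theorem bVisit_sound (items : List (String × List String)) (prods : List (String × String))
    (hprods : prods = bProds items) (st : PySem.Set String × List String) (i : Nat)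
    (hi : i < prods.length) (h : ∀ x ∈ st.1, NL items x) :
    ∀ x ∈ (bVisit prods st i).1, NL items x := by
  subst hprods
  intro x hx
  simp only [bVisit] at hx
  split_ifs at hx with hc
  · rcases (PySem.Set.mem_add _ _ _).1 hx with hx | rfl
    · exact h x hx
    · obtain ⟨ps, hin, hp⟩ := bProds_split items _ (getD_mem_of_lt _ i hi)
      refine NL.mk _ ps _ hin hp (fun c hc2 => ?_)
      have hall := hc.2
      unfold delAllNull at hall
      rw [List.all_eq_true] at hall
      exact h _ ((PySem.Set.contains_iff _ _).1 (hall c hc2))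
  · exact h x hx

theorem bVisit_meas (prods : List (String × String)) (keys : List String)
    (st : PySem.Set String × List String) (i : Nat)
    (hq1 : (prods.getD i ("", "")).1 ∈ keys) :
    (bVisit prods st i).2.length + keys.countP (fun k => decide (k ∉ (bVisit prods st i).1)) ≤
      st.2.length + keys.countP (fun k => decide (k ∉ st.1)) := by
  simp only [bVisit]
  split_ifs with hc
  · have hq2 : (prods.getD i ("", "")).1 ∉ st.1 :=
      fun hm => hc.1 ((PySem.Set.contains_iff _ _).2 hm)
    have hlt := countP_notin_lt (keys := keys) hq1
      (fun y hy => (PySem.Set.mem_add _ _ _).2 (Or.inl hy)) hq2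
      ((PySem.Set.mem_add _ _ _).2 (Or.inr rfl))
    simp only [List.length_cons]
    omega
  · exact Nat.le_refl _

theorem bVisit_cases (prods : List (String × String)) (st : PySem.Set String × List String)
    (i : Nat) :
    (prods.getD i ("", "")).1 ∈ (bVisit prods st i).1 ∨
      (bVisit prods st i = st ∧
        ∃ c ∈ (prods.getD i ("", "")).2.toList, String.ofList [c] ∉ st.1) := by
  simp only [bVisit]
  split_ifs with hc
  · exact Or.inl ((PySem.Set.mem_add _ _ _).2 (Or.inr rfl))
  · rw [Decidable.not_and_iff_not_or_not, not_not] at hc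
    rcases hc with hc | hc
    · exact Or.inl ((PySem.Set.contains_iff _ _).1 hc)
    · refine Or.inr ⟨rfl, ?_⟩
      rw [Bool.not_eq_true] at hc
      unfold delAllNull at hc
      rw [List.all_eq_false] at hc
      obtain ⟨c, hcm, hcf⟩ := hc
      refine ⟨c, hcm, fun hmem => ?_⟩
      rw [(PySem.Set.contains_iff _ _).2 hmem] at hcf
      simp at hcf

theorem bScan_aux (items : List (String × List String)) (prods : List (String × String))
    (hprods : prods = bProds items) (keys : List String) (hkeys : keys = items.map Prod.fst)
    (idxs : List Nat) (hidx : ∀ i ∈ idxs, i < prods.length)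
    (st : PySem.Set String × List String) :
    (∀ x ∈ st.1, x ∈ (bScan prods idxs st).1) ∧
    (∀ x ∈ st.2, x ∈ (bScan prods idxs st).2) ∧
    (∀ x ∈ (bScan prods idxs st).1, x ∈ st.1 ∨ x ∈ (bScan prods idxs st).2) ∧
    ((st.2.Nodup ∧ ∀ x ∈ st.2, x ∈ st.1) →
      ((bScan prods idxs st).2.Nodup ∧
        ∀ x ∈ (bScan prods idxs st).2, x ∈ (bScan prods idxs st).1)) ∧
    ((∀ x ∈ st.1, NL items x) → ∀ x ∈ (bScan prods idxs st).1, NL items x) ∧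
    ((bScan prods idxs st).2.length +
        keys.countP (fun k => decide (k ∉ (bScan prods idxs st).1)) ≤
      st.2.length + keys.countP (fun k => decide (k ∉ st.1))) ∧
    (∀ i ∈ idxs, (∀ c ∈ (prods.getD i ("", "")).2.toList,
        String.ofList [c] ∈ (bScan prods idxs st).1 ∧
          String.ofList [c] ∉ (bScan prods idxs st).2) →
      (prods.getD i ("", "")).1 ∈ (bScan prods idxs st).1) := by
  induction idxs generalizing st with
  | nil =>
    exact ⟨fun x hx => hx, fun x hx => hx, fun x hx => Or.inl hx, fun h => h,
      fun h => h, Nat.le_refl _, fun i hi => absurd hi (List.not_mem_nil)⟩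
  | cons j idxs ih =>
    have hj : j < prods.length := hidx j (List.mem_cons_self)
    have hidx2 : ∀ i ∈ idxs, i < prods.length :=
      fun i hi => hidx i (List.mem_cons_of_mem _ hi)
    rw [show bScan prods (j :: idxs) st = bScan prods idxs (bVisit prods st j) from rfl]
    obtain ⟨ih1, ih2, ih3, ih4, ih5, ih6, ih7⟩ := ih hidx2 (bVisit prods st j)
    refine ⟨?_, ?_, ?_, ?_, ?_, ?_, ?_⟩
    · exact fun x hx => ih1 x (bVisit_mono prods st j x hx)
    · exact fun x hx => ih2 x (bVisit_qmono prods st j x hx)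
    · intro x hx
      rcases ih3 x hx with hx2 | hx2
      · rcases bVisit_sub prods st j x hx2 with h | h
        · exact Or.inl h
        · exact Or.inr (ih2 x h)
      · exact Or.inr hx2
    · exact fun h => ih4 (bVisit_pres prods st j h)
    · exact fun h => ih5 (bVisit_sound items prods hprods st j hj h)
    · calc (bScan prods idxs (bVisit prods st j)).2.length +
          keys.countP (fun k => decide (k ∉ (bScan prods idxs (bVisit prods st j)).1))
          ≤ (bVisit prods st j).2.length +
            keys.countP (fun k => decide (k ∉ (bVisit prods st j).1)) := ih6
        _ ≤ st.2.length + keys.countP (fun k => decide (k ∉ st.1)) := by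
            refine bVisit_meas prods keys st j ?_
            rw [hkeys]
            exact bProds_fst items _ (hprods ▸ getD_mem_of_lt prods j hj)
    · intro i hi hall
      rcases List.mem_cons.1 hi with rfl | hi2
      · rcases bVisit_cases prods st i with h | ⟨heq, c, hcm, hcn⟩
        · exact ih1 _ h
        · obtain ⟨hc1, hc2⟩ := hall c hcm
          rcases ih3 _ hc1 with h2 | h2
          · rw [heq] at h2
            exact absurd h2 hcn
          · exact absurd h2 hc2
      · exact ih7 i hi2 hall

-- B-side: worklist loop ----------------------------------------------------

def BInv (items : List (String × List String)) (prods : List (String × String))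
    (null : PySem.Set String) (q : List String) : Prop :=
  (∀ x ∈ null, NL items x) ∧ (∀ x ∈ q, x ∈ null) ∧ q.Nodup ∧
  (∀ p ∈ prods, (∀ c ∈ p.2.toList,
      String.ofList [c] ∈ null ∧ String.ofList [c] ∉ q) → p.1 ∈ null)

theorem bWork_spec (items : List (String × List String)) (prods : List (String × String))
    (hprods : prods = bProds items) (keys : List String) (hkeys : keys = items.map Prod.fst)
    (fuel : Nat) :
    ∀ (null : PySem.Set String) (q : List String), BInv items prods null q →
      q.length + keys.countP (fun k => decide (k ∉ null)) ≤ fuel →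
      (∀ x ∈ null, x ∈ bWork prods (bOcc prods) fuel null q) ∧
      (∀ x ∈ bWork prods (bOcc prods) fuel null q, NL items x) ∧
      ClosedP prods (bWork prods (bOcc prods) fuel null q) := by
  induction fuel with
  | zero =>
    intro null q hinv hm
    have hq : q = [] := List.eq_nil_of_length_eq_zero (by omega)
    subst hq
    simp only [bWork]
    exact ⟨fun x hx => hx, hinv.1,
      fun p hp hall => hinv.2.2.2 p hp (fun c hc => ⟨hall c hc, by simp⟩)⟩
  | succ n ih =>
    intro null q hinv hm
    cases q with
    | nil =>
      simp only [bWork]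
      exact ⟨fun x hx => hx, hinv.1,
        fun p hp hall => hinv.2.2.2 p hp (fun c hc => ⟨hall c hc, by simp⟩)⟩
    | cons s rest =>
      simp only [bWork]
      have hidx : ∀ i ∈ (bOcc prods).getD s [], i < prods.length :=
        fun i hi => bOcc_lt prods s i hi
      obtain ⟨c1, c2, c3, c4, c5, c6, c7⟩ :=
        bScan_aux items prods hprods keys hkeys ((bOcc prods).getD s []) hidx (null, rest)
      obtain ⟨hS, hQ, hND, hC⟩ := hinv
      have hrest_sub : ∀ x ∈ rest, x ∈ null := fun x hx => hQ x (List.mem_cons_of_mem _ hx)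
      have hrest_nd : rest.Nodup := (List.nodup_cons.1 hND).2
      obtain ⟨hND2, hQ2⟩ := c4 ⟨hrest_nd, hrest_sub⟩
      set st := bScan prods ((bOcc prods).getD s []) (null, rest) with hst
      have hinv2 : BInv items prods st.1 st.2 := by
        refine ⟨c5 hS, hQ2, hND2, ?_⟩
        intro p hp hall
        by_cases hold : ∀ c ∈ p.2.toList,
            String.ofList [c] ∈ null ∧ String.ofList [c] ∉ s :: rest
        · exact c1 _ (hC p hp hold)
        · push Not at hold
          obtain ⟨c, hcm, himp⟩ := hold
          obtain ⟨hc1, hc2⟩ := hall c hcm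
          by_cases hcn : String.ofList [c] ∈ null
          · rcases List.mem_cons.1 (himp hcn) with heqs | hmem
            · obtain ⟨i, hi, hpi⟩ := List.mem_iff_getElem.1 hp
              have hocc : i ∈ (bOcc prods).getD s [] := by
                rw [← heqs]
                exact bOcc_complete prods i hi c (by rw [hpi]; exact hcm)
              have hgd : prods.getD i ("", "") = p := by
                rw [List.getD_eq_getElem prods _ hi, hpi]
              have := c7 i hocc (by rw [hgd]; exact hall)
              rw [hgd] at this
              exact this
            · exact absurd (c2 _ hmem) hc2
          · rcases c3 _ hc1 with h2 | h2
            · exact absurd h2 hcn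
            · exact absurd h2 hc2
      have hm2 : st.2.length + keys.countP (fun k => decide (k ∉ st.1)) ≤ n := by
        have : rest.length + keys.countP (fun k => decide (k ∉ null)) ≤ n := by
          simp only [List.length_cons] at hm
          omega
        calc st.2.length + keys.countP (fun k => decide (k ∉ st.1))
            ≤ rest.length + keys.countP (fun k => decide (k ∉ null)) := c6
          _ ≤ n := this
      obtain ⟨ih1, ih2, ih3⟩ := ih st.1 st.2 hinv2 hm2
      exact ⟨fun x hx => ih1 x (c1 x hx), ih2, ih3⟩

theorem NL_mem_of_closedP (items : List (String × List String)) (N : PySem.Set String)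
    (hcl : ClosedP (bProds items) N) : ∀ x, NL items x → x ∈ N := by
  intro x hx
  induction hx with
  | mk nt ps p hin hp hch ih =>
    refine hcl (nt, p) ?_ (fun c hc => ih c hc)
    unfold bProds
    exact List.mem_flatMap.2 ⟨(nt, ps), hin, List.mem_map.2 ⟨p, hp, rfl⟩⟩

theorem B_char (items : List (String × List String)) :
    ∀ x, x ∈ bWork (bProds items) (bOcc (bProds items))
        ((bSeed (bProds items)).2.length + items.length) (bSeed (bProds items)).1
        (bSeed (bProds items)).2 ↔ NL items x := by
  intro x
  obtain ⟨s1, s2, s3, s4⟩ := bSeed_aux (bProds items) (PySem.Set.empty, [])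
  rw [← bSeed_eq] at s1 s2 s3 s4
  have hempty : ∀ y : String, y ∉ (PySem.Set.empty : PySem.Set String) := by
    intro y hy
    simp [PySem.Set.empty] at hy
  have seed1 : ∀ y, y ∈ (bSeed (bProds items)).1 ↔ (y, "") ∈ bProds items := by
    intro y
    rw [s2 y]
    exact ⟨fun h => h.resolve_left (hempty y), Or.inr⟩
  have seed2 : ∀ y, y ∈ (bSeed (bProds items)).2 ↔ y ∈ (bSeed (bProds items)).1 := by
    intro y
    rw [s3 y]
    constructor
    · rintro (h | ⟨h, _⟩)
      · simp at h
      · exact h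
    · exact fun h => Or.inr ⟨h, hempty y⟩
  obtain ⟨seed3, _⟩ := s4 ⟨List.nodup_nil, by simp⟩
  have hinv : BInv items (bProds items) (bSeed (bProds items)).1 (bSeed (bProds items)).2 := by
    refine ⟨?_, fun y hy => (seed2 y).1 hy, seed3, ?_⟩
    · intro y hy
      obtain ⟨ps, hin, hp⟩ := bProds_split items _ ((seed1 y).1 hy)
      exact NL.mk y ps "" hin hp (by simp)
    · intro p hp hall
      cases htl : p.2.toList with
      | nil =>
        have hp2 : p.2 = "" := by
          have hlen : PySem.Str.len p.2 = 0 := by simp [PySem.Str.len_eq, htl]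
          exact (str_len_zero_iff p.2).1 hlen
        refine (seed1 p.1).2 ?_
        rw [← hp2]
        simpa using hp
      | cons c cs =>
        have hcm : c ∈ p.2.toList := by rw [htl]; exact List.mem_cons_self
        obtain ⟨hc1, hc2⟩ := hall c hcm
        exact absurd ((seed2 _).2 hc1) hc2
  have hm : (bSeed (bProds items)).2.length +
      (items.map Prod.fst).countP (fun k => decide (k ∉ (bSeed (bProds items)).1)) ≤
      (bSeed (bProds items)).2.length + items.length := by
    have := List.countP_le_length
      (p := fun k => decide (k ∉ (bSeed (bProds items)).1)) (l := items.map Prod.fst)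
    have hlen : (items.map Prod.fst).length = items.length := List.length_map _
    omega
  obtain ⟨h1, h2, h3⟩ := bWork_spec items (bProds items) rfl (items.map Prod.fst) rfl
    ((bSeed (bProds items)).2.length + items.length) (bSeed (bProds items)).1
    (bSeed (bProds items)).2 hinv hm
  constructor
  · exact fun h => h2 x h
  · exact fun h => NL_mem_of_closedP items _ h3 x h

-- rebuilding the rule table -----------------------------------------------

theorem delNewProd_eq_empty (null : PySem.Set String) (p : String)
    (h : delAllNull null p = true) : delNewProd null p = "" := by
  unfold delNewProd
  rw [PySem.List.foldl_append_ite_eq_filter]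
  unfold delAllNull at h
  rw [List.all_eq_true] at h
  have hfil : p.toList.filter
      (fun c => decide ¬(PySem.Set.contains null (String.ofList [c]) = true)) = [] := by
    rw [List.filter_eq_nil_iff]
    intro c hc
    have hmem := (PySem.Set.contains_iff _ _).1 (h c hc)
    simp [hmem]
  rw [List.nil_append, hfil]

theorem rulesA_inner (null : PySem.Set String) (d : PySem.Dict String (List String))
    (k : String) (ps : List String) (acc : List String) :
    ps.foldl (fun d prod =>
      if PySem.Str.len prod = 0 then d
      else if delAllNull null prod then
        d.insert k (d.getD k [] ++ [delNewProd null prod])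
      else d.insert k (d.getD k [] ++ [prod])) (d.insert k acc)
    = d.insert k (acc ++ (ps.filter (fun p => decide ¬(PySem.Str.len p = 0))).map
        (fun p => if delAllNull null p then delNewProd null p else p)) := by
  induction ps generalizing acc with
  | nil => simp
  | cons p ps ih =>
    rw [List.foldl_cons, List.filter_cons]
    by_cases hlen : PySem.Str.len p = 0
    · rw [if_pos hlen]
      have hd : (decide ¬(PySem.Str.len p = 0)) = false := decide_eq_false (not_not_intro hlen)
      rw [hd]
      simp only [Bool.false_eq_true, if_false]
      exact ih acc
    · have hd : (decide ¬(PySem.Str.len p = 0)) = true := decide_eq_true hlen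
      rw [if_neg hlen, hd]
      simp only [if_true]
      have hstep : (if delAllNull null p then
            (d.insert k acc).insert k ((d.insert k acc).getD k [] ++ [delNewProd null p])
          else (d.insert k acc).insert k ((d.insert k acc).getD k [] ++ [p]))
          = d.insert k (acc ++ [if delAllNull null p then delNewProd null p else p]) := by
        rw [PySem.Dict.getD_insert_self, dict_insert_insert_self, dict_insert_insert_self]
        by_cases hall : delAllNull null p
        · rw [if_pos hall, if_pos hall]
        · rw [if_neg hall, if_neg hall]
      rw [hstep, ih (acc ++ [if delAllNull null p then delNewProd null p else p])]
      simp

-- main ---------------------------------------------------------------------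

theorem DEL_eq (non_terminal_set terminal_set : List String) (start_symbol : String)
    (rules : List (String × List String)) :
    DEL non_terminal_set terminal_set start_symbol rules =
      DEL_alt non_terminal_set terminal_set start_symbol rules := by
  simp only [DEL, DEL_alt]
  set items := (PySem.Dict.ofList rules).items with hitems
  set NA := delLoop items (items.length + 1) (delSeed start_symbol items) with hNA
  set NB := bWork (bProds items) (bOcc (bProds items))
    ((bSeed (bProds items)).2.length + items.length) (bSeed (bProds items)).1
    (bSeed (bProds items)).2 with hNB
  have hmem : ∀ x, x ∈ NA ↔ x ∈ NB :=
    fun x => (A_char items start_symbol x).trans ((B_char items x).symm)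
  have hnodup : (items.map Prod.fst).Nodup := by
    have h := PySem.Dict.nodup_keys_ofList rules
    simpa [PySem.Dict.keys] using h
  simp only [Prod.mk.injEq]
  refine ⟨trivial, trivial, trivial, ?_⟩
  have hAfold : items.foldl (fun d q => q.2.foldl (fun d prod =>
        if PySem.Str.len prod = 0 then d
        else if delAllNull NA prod then
          d.insert q.1 (d.getD q.1 [] ++ [delNewProd NA prod])
        else d.insert q.1 (d.getD q.1 [] ++ [prod])) (d.insert q.1 ([] : List String)))
        PySem.Dict.empty
      = items.foldl (fun d q => d.insert q.1
          ((q.2.filter (fun p => decide ¬(PySem.Str.len p = 0))).map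
            (fun p => if delAllNull NA p then delNewProd NA p else p))) PySem.Dict.empty := by
    refine PySem.List.foldl_congr_mem items _ _ _ (fun d q hq => ?_)
    rw [rulesA_inner]
    simp
  rw [hAfold]
  rw [PySem.Dict.items_foldl_insert_fresh items Prod.fst _ PySem.Dict.empty
        (fun a _ => PySem.Dict.contains_empty _) hnodup,
      PySem.Dict.items_foldl_insert_fresh items Prod.fst _ PySem.Dict.empty
        (fun a _ => PySem.Dict.contains_empty _) hnodup]
  refine congrArg _ ?_
  refine List.map_congr_left (fun q hq => ?_)
  simp only [Prod.mk.injEq]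
  refine ⟨trivial, ?_⟩
  have hfil : q.2.filter (fun p => decide ¬(PySem.Str.len p = 0)) =
      q.2.filter (fun p => decide (0 < PySem.Str.len p)) := by
    refine List.filter_congr (fun p _ => ?_)
    refine decide_eq_decide.2 ?_
    rw [PySem.Str.len_eq]
    omega
  rw [hfil]
  refine List.map_congr_left (fun p _ => ?_)
  rw [delAllNull_congr hmem p]
  by_cases hall : delAllNull NB p = true
  · rw [if_pos hall, if_pos hall]
    exact delNewProd_eq_empty NA p (by rw [delAllNull_congr hmem p]; exact hall)
  · rw [if_neg ?hf, if_neg ?hf2]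
    case hf => exact fun hh => hall hh
    case hf2 => exact fun hh => hall hh

-- ===== VERDICT (by name: the statement is the Claim_ definition above) =====
theorem DEL_spec : Claim_equal_DEL := by
  intro non_terminal_set terminal_set start_symbol rules _
  unfold Spec_DEL
  exact DEL_eq non_terminal_set terminal_set start_symbol rules
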